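-- pv_equiv track=rewrite | github.com/gjoshi2424/model_evals | travel_planner_eval/src/utils.py | is_valid_city_sequence
-- ===== SOURCE A (Python) =====
-- def is_valid_city_sequence(city_list: list[str]) -> bool:
--     """Check that a city visit sequence is valid.
--
--     Args:
--         city_list: Ordered list of city names representing the day-by-day itinerary.
--
--     Returns:
--         True if the sequence is valid, False otherwise.
--     """
--     min_cities = 3  # origin + at least one destination + return to origin
--     if len(city_list) < min_cities:
--         return False
--
--     visited_cities: set[str] = set()
--     i = 0
--     while i < len(city_list):
--         city = city_list[i]
--
--         if city in visited_cities and (i != 0 and i != len(city_list) - 1):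
--             return False
--
--         count = 0
--         while i < len(city_list) and city_list[i] == city:
--             count += 1
--             i += 1
--
--         if count == 1 and 0 < i - 1 < len(city_list) - 1:
--             return False
--
--         visited_cities.add(city)
--
--     return True
-- ===== SOURCE B (Python) =====
-- def is_valid_city_sequence(city_list: list[str]) -> bool:
--     """Stateless positionwise characterization: each interior index must either
--     continue the previous day's city, or start a run of length >= 2 of a city
--     not seen earlier in the itinerary."""
--     n = len(city_list)
--     if n < 3:
--         return False
--     return all(
--         city_list[i] == city_list[i - 1]
--         or (city_list[i] == city_list[i + 1] and city_list[i] not in city_list[:i])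
--         for i in range(1, n - 1)
--     )
-- ===== Notes on version B (the rewrite author's own statement) =====
-- stated objective: simpler
-- what changed: Replaces A's stateful run scan (nested while loops advancing a shared index, plus a visited set built along the way) with a stateless per-index characterization: a single comprehension that checks, for each interior index, that it continues the previous city or starts a run of length >= 2 of a city absent from the prefix.
import Mathlib
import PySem

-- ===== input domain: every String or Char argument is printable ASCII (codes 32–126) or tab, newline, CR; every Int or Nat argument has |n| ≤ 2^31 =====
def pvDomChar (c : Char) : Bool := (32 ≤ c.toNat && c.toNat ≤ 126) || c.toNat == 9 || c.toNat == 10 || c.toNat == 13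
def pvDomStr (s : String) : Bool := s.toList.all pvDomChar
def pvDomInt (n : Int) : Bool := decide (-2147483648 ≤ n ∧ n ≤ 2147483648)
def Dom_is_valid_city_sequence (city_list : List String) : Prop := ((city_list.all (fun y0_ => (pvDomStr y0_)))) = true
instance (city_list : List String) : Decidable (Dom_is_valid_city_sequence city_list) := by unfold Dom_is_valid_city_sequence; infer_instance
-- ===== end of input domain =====

-- B replaces A's stateful run scan (nested while loops, visited set) with a stateless
-- per-index check over a single comprehension; same return value, alternative/simpler shape.

-- ===== PORT A =====
-- inner while loop: 'while i < len(city_list) and city_list[i] == city: count += 1; i += 1' — returns the count added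
def aRunCount (xs : List String) (city : String) (i : Nat) : Nat :=
  if h : i < xs.length then
    if xs.getD i "" = city then aRunCount xs city (i + 1) + 1 else 0
  else 0
termination_by xs.length - i

theorem aRunCount_pos (xs : List String) (i : Nat) (h : i < xs.length) :
    1 ≤ aRunCount xs (xs.getD i "") i := by
  unfold aRunCount
  simp [h]

-- outer while loop over i with the visited set
def aLoop (xs : List String) (visited : PySem.Set String) (i : Nat) : Bool :=
  if h : i < xs.length then
    let city := xs.getD i ""
    if visited.contains city && (decide (i ≠ 0) && decide (i ≠ xs.length - 1)) then false
    else
      let count := aRunCount xs city i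
      let i' := i + count
      if count == 1 && (decide (0 < i' - 1) && decide (i' - 1 < xs.length - 1)) then false
      else aLoop xs (visited.add city) i'
  else true
termination_by xs.length - i
decreasing_by
  have := aRunCount_pos xs i h
  omega

def is_valid_city_sequence (city_list : List String) : Bool :=
  if city_list.length < 3 then false
  else aLoop city_list PySem.Set.empty 0

-- ===== PORT B =====
-- body of Source B's comprehension at index i; 'city_list[:i]' is 'take i' (exact: 0 ≤ i),
-- 'in' on a list of strings is List.contains
def bOk (xs : List String) (i : Nat) : Bool :=
  xs.getD i "" == xs.getD (i - 1) "" ||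
    (xs.getD i "" == xs.getD (i + 1) "" && !((xs.take i).contains (xs.getD i "")))

-- 'range(1, n-1)' is List.range' 1 (n-2); 'all(...)' is List.all
def is_valid_city_sequence_alt (city_list : List String) : Bool :=
  if city_list.length < 3 then false
  else (List.range' 1 (city_list.length - 2)).all (bOk city_list)

-- ===== PRECONDITION & SPEC =====
def Spec_is_valid_city_sequence (city_list : List String) (out : Bool) : Prop := out = is_valid_city_sequence_alt city_list
instance (city_list : List String) (out : Bool) : Decidable (Spec_is_valid_city_sequence city_list out) := by unfold Spec_is_valid_city_sequence; infer_instance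

-- ===== CLAIM (what is proved, stated in full; the proofs are below) =====
def Claim_equal_is_valid_city_sequence : Prop := ∀ (city_list : List String), Dom_is_valid_city_sequence city_list → Spec_is_valid_city_sequence city_list (is_valid_city_sequence city_list)

-- ===== LEMMAS AND PROOFS =====

-- the run scan never runs past the end of the list
theorem aRunCount_le (xs : List String) (city : String) (i : Nat) (hi : i ≤ xs.length) :
    i + aRunCount xs city i ≤ xs.length := by
  unfold aRunCount
  split
  · split
    · have := aRunCount_le xs city (i + 1) (by omega)
      omega
    · omega
  · omega
termination_by xs.length - i

-- every index scanned by the run belongs to the run's city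
theorem aRunCount_mem (xs : List String) (city : String) (i : Nat) :
    ∀ j, i ≤ j → j < i + aRunCount xs city i → xs.getD j "" = city := by
  intro j hij hlt
  unfold aRunCount at hlt
  split at hlt
  · split at hlt
    · rcases Nat.eq_or_lt_of_le hij with h | h
      · subst h; assumption
      · exact aRunCount_mem xs city (i + 1) j h (by omega)
    · omega
  · omega
termination_by xs.length - i

-- the run stops at the end of the list or at a different city
theorem aRunCount_end (xs : List String) (city : String) (i : Nat) (hi : i ≤ xs.length) :
    i + aRunCount xs city i = xs.length ∨ xs.getD (i + aRunCount xs city i) "" ≠ city := by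
  unfold aRunCount
  split
  · split
    · have := aRunCount_end xs city (i + 1) (by omega)
      rcases this with h | h
      · left; omega
      · right
        have e : i + (aRunCount xs city (i + 1) + 1) = i + 1 + aRunCount xs city (i + 1) := by omega
        rw [e]; exact h
    · right; simpa using ‹¬ xs.getD i "" = city›
  · left; omega
termination_by xs.length - i

-- membership in a prefix extended by a constant segment
theorem take_contains_seg (xs : List String) (c c' : String) (i : Nat) :
    ∀ k, i + k ≤ xs.length → (∀ j, i ≤ j → j < i + k → xs.getD j "" = c) →
      (xs.take (i + k)).contains c' =
        ((xs.take i).contains c' || (decide (k ≠ 0) && (c' == c))) := by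
  intro k
  induction k with
  | zero => intro _ _; simp
  | succ k ih =>
    intro hle hseg
    have hlt : i + k < xs.length := by omega
    have e : i + (k + 1) = (i + k) + 1 := by omega
    rw [e, List.take_add_one, List.contains_append]
    have hget : xs[i + k]? = some c := by
      have := hseg (i + k) (by omega) (by omega)
      rw [List.getD_eq_getElem xs "" hlt] at this
      simp [List.getElem?_eq_getElem hlt, this]
    rw [ih (by omega) (fun j h1 h2 => hseg j h1 (by omega)), hget]
    by_cases h : c' = c <;> cases hm : (xs.take i).contains c' <;> simp [h]

-- adding to a PySem.Set, at the level of contains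
theorem add_contains (s : PySem.Set String) (c c' : String) :
    (PySem.Set.add s c).contains c' = (s.contains c' || (c' == c)) := by
  unfold PySem.Set.add
  split
  · by_cases he : c' = c
    · subst he; simp [PySem.Set.contains] at *; simp [‹_›]
    · simp [beq_iff_eq, he]
  · by_cases he : c' = c <;> simp [PySem.Set.contains, he]

-- interior of a run satisfies bOk trivially
theorem bOk_interior (xs : List String) (j : Nat)
    (h : xs.getD j "" = xs.getD (j - 1) "") : bOk xs j = true := by
  unfold bOk
  rw [h]
  simp

-- main invariant: the outer while loop from a run boundary i equals the positionwise
-- check over all interior indices ≥ i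
theorem loop_eq (xs : List String) (i : Nat) (hi : i ≤ xs.length)
    (hb : i = 0 ∨ i = xs.length ∨ xs.getD i "" ≠ xs.getD (i - 1) "")
    (visited : PySem.Set String)
    (hv : ∀ c, visited.contains c = (xs.take i).contains c) :
    aLoop xs visited i = (List.range' i (xs.length - 1 - i)).all (bOk xs) := by
  rw [aLoop]
  by_cases h : i < xs.length
  case neg =>
    have : i = xs.length := by omega
    simp [this]
  case pos =>
  rw [dif_pos h]
  simp only []
  set n := xs.length with hn
  set c := xs.getD i "" with hc
  set k := aRunCount xs c i with hk
  have hk1 : 1 ≤ k := aRunCount_pos xs i h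
  have hle : i + k ≤ n := aRunCount_le xs c i (by omega)
  have hmem : ∀ j, i ≤ j → j < i + k → xs.getD j "" = c := aRunCount_mem xs c i
  have hend : i + k = n ∨ xs.getD (i + k) "" ≠ c := aRunCount_end xs c i (by omega)
  -- the recursive call
  have hv' : ∀ c', (visited.add c).contains c' = (xs.take (i + k)).contains c' := by
    intro c'
    rw [add_contains, hv, take_contains_seg xs c c' i k hle hmem]
    have : decide (k ≠ 0) = true := by simp; omega
    rw [this, Bool.true_and]
  have hb' : i + k = 0 ∨ i + k = n ∨ xs.getD (i + k) "" ≠ xs.getD (i + k - 1) "" := by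
    rcases hend with h' | h'
    · right; left; exact h'
    · right; right
      have : xs.getD (i + k - 1) "" = c := hmem (i + k - 1) (by omega) (by omega)
      rw [this]; exact h'
  have IH := loop_eq xs (i + k) hle hb' (visited.add c) hv'
  -- decompose the RHS all
  have interior : ∀ j, i < j → j < i + k → bOk xs j = true := by
    intro j h1 h2
    exact bOk_interior xs j (by
      rw [hmem j (by omega) h2, hmem (j - 1) (by omega) (by omega)])
  have hRHS : (List.range' i (n - 1 - i)).all (bOk xs) =
      ((if i < n - 1 then bOk xs i else true) &&
        (List.range' (i + k) (n - 1 - (i + k))).all (bOk xs)) := by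
    by_cases hcase : i + k ≤ n - 1
    · have hsplit : List.range' i (n - 1 - i) =
          List.range' i k ++ List.range' (i + k) (n - 1 - (i + k)) := by
        rw [List.range'_append_1]
        congr 1
        omega
      rw [hsplit, List.all_append]
      have hilt : i < n - 1 := by omega
      have hk' : k = (k - 1) + 1 := by omega
      have : (List.range' i k).all (bOk xs) = bOk xs i := by
        rw [hk', List.range'_succ, List.all_cons]
        have : (List.range' (i + 1) (k - 1)).all (bOk xs) = true := by
          rw [List.all_eq_true]
          intro j hj
          rw [List.mem_range'_1] at hj
          exact interior j (by omega) (by omega)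
        rw [this, Bool.and_true]
      rw [this, if_pos hilt]
    · have hik : n - 1 - (i + k) = 0 := by omega
      rw [hik]
      simp only [List.range'_zero, List.all_nil, Bool.and_true]
      by_cases hilt : i < n - 1
      · have hd : n - 1 - i = ((n - 1 - i) - 1) + 1 := by omega
        rw [if_pos hilt, hd, List.range'_succ, List.all_cons]
        have : (List.range' (i + 1) (n - 1 - i - 1)).all (bOk xs) = true := by
          rw [List.all_eq_true]
          intro j hj
          rw [List.mem_range'_1] at hj
          exact interior j (by omega) (by omega)
        rw [this, Bool.and_true]
      · have : n - 1 - i = 0 := by omega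
        rw [if_neg hilt, this]
        simp
  rw [hRHS]
  -- now compare A's two run checks with the start condition
  by_cases hF1 : (visited.contains c && (decide (i ≠ 0) && decide (i ≠ n - 1))) = true
  · -- A fails on the revisit rule: i ≠ 0, i ≠ n-1, c in prefix
    rw [if_pos hF1]
    simp only [Bool.and_eq_true, decide_eq_true_eq] at hF1
    obtain ⟨hmemv, hi0, hin1⟩ := hF1
    have hilt : i < n - 1 := by omega
    have hPb : bOk xs i = false := by
      unfold bOk
      rcases hb with h0 | hN | hne
      · omega
      · omega
      · have h1 : (xs.getD i "" == xs.getD (i - 1) "") = false := by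
          simp only [beq_eq_false_iff_ne, ne_eq]; exact hne
        have h2 : ((xs.take i).contains (xs.getD i "")) = true := by
          rw [← hc, ← hv]; exact hmemv
        rw [h1, ← hc, h2]
        simp
    rw [if_pos hilt, hPb]
    simp
  · rw [if_neg hF1]
    by_cases hF2 : ((aRunCount xs c i == 1) &&
        (decide (0 < i + aRunCount xs c i - 1) && decide (i + aRunCount xs c i - 1 < n - 1))) = true
    · -- A fails on the singleton rule: k = 1 and 0 < i < n-1
      rw [if_pos hF2]
      simp only [← hk, Bool.and_eq_true, beq_iff_eq, decide_eq_true_eq] at hF2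
      obtain ⟨hk1', hlo, hhi⟩ := hF2
      have hi0 : 0 < i := by omega
      have hilt : i < n - 1 := by omega
      have hPb : bOk xs i = false := by
        unfold bOk
        rcases hb with h0 | hN | hne
        · omega
        · omega
        · have h1 : (xs.getD i "" == xs.getD (i - 1) "") = false := by
            simp only [beq_eq_false_iff_ne, ne_eq]; exact hne
          have hnext : xs.getD (i + 1) "" ≠ c := by
            rcases hend with hE | hE
            · omega
            · rw [hk1'] at hE; exact hE
          have h2 : (xs.getD i "" == xs.getD (i + 1) "") = false := by
            simp only [beq_eq_false_iff_ne, ne_eq, ← hc]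
            intro hEq; exact hnext hEq.symm
          rw [h1, h2]
          simp
      rw [if_pos hilt, hPb]
      simp
    · -- A passes this run; show the start condition holds and recurse
      rw [if_neg hF2, IH]
      have hstart : (if i < n - 1 then bOk xs i else true) = true := by
        by_cases hilt : i < n - 1
        · rw [if_pos hilt]
          by_cases hi0 : i = 0
          · subst hi0
            unfold bOk
            simp
          · -- 1 ≤ i < n-1: ¬F1 gives c not in prefix, ¬F2 gives k ≥ 2
            have hnmem : visited.contains c = false := by
              by_contra hcon
              apply hF1
              simp only [Bool.and_eq_true, decide_eq_true_eq]
              refine ⟨by simpa using hcon, hi0, by omega⟩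
            have hk2 : 2 ≤ k := by
              by_contra hcon
              have hk1'' : k = 1 := by omega
              apply hF2
              simp only [← hk, Bool.and_eq_true, beq_iff_eq, decide_eq_true_eq]
              refine ⟨hk1'', by omega, by omega⟩
            unfold bOk
            have h2 : xs.getD (i + 1) "" = c := hmem (i + 1) (by omega) (by omega)
            rw [← hc, h2]
            have h3 : ((xs.take i).contains c) = false := by rw [← hv]; exact hnmem
            rw [h3]
            simp
        · rw [if_neg hilt]
      rw [hstart, Bool.true_and]
termination_by xs.length - i
decreasing_by
  clear_value k c
  rw [← hc, ← hk]
  omega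

-- ===== VERDICT (by name: the statement is the Claim_ definition above) =====
theorem is_valid_city_sequence_spec : Claim_equal_is_valid_city_sequence := by
  intro xs _
  unfold Spec_is_valid_city_sequence is_valid_city_sequence is_valid_city_sequence_alt
  by_cases h : xs.length < 3
  · simp [h]
  · rw [if_neg h, if_neg h]
    have hmain := loop_eq xs 0 (by omega) (Or.inl rfl) PySem.Set.empty
      (by intro c; simp [PySem.Set.empty, PySem.Set.contains])
    rw [hmain]
    -- range' 0 (n-1) vs range' 1 (n-2): index 0 satisfies bOk trivially (getD (0-1) = getD 0)
    have hsplit : List.range' 0 (xs.length - 1 - 0) = 0 :: List.range' 1 (xs.length - 2) := by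
      have : xs.length - 1 - 0 = (xs.length - 2) + 1 := by omega
      rw [this, List.range'_succ]
    rw [hsplit, List.all_cons]
    have h0 : bOk xs 0 = true := by unfold bOk; simp
    rw [h0, Bool.true_and]
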